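-- pv_equiv track=rewrite | github.com/stevenviola/advent-of-code-2023 | 02/cube-conundrum.py | process_colors
-- ===== SOURCE A (Python) =====
-- def process_colors(colors, limits):
--     product = 1
--     is_valid = True
--     for color, value in colors.items():
--         product *= value
--         if color in limits and value > limits[color]:
--             is_valid = False
--     return (is_valid, product)
-- ===== SOURCE B (Python) =====
-- def process_colors(colors, limits):
--     def ok(color, value):
--         return not (color in limits and value > limits[color])
--     def go(items):
--         if not items:
--             return (True, 1)
--         if len(items) == 1:
--             color, value = items[0]
--             return (ok(color, value), value)
--         m = len(items) // 2
--         v1, p1 = go(items[:m])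
--         v2, p2 = go(items[m:])
--         return (v1 and v2, p1 * p2)
--     return go(list(colors.items()))
-- ===== Notes on version B (the rewrite author's own statement) =====
-- stated objective: alternative
-- what changed: Replaces A's fused forward accumulator loop with a divide-and-conquer reduction: the item list is split in half, each half is reduced recursively to a (validity, product) pair, and the halves are combined with 'and' and '*'; correct because both combinators are associative.
import Mathlib
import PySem

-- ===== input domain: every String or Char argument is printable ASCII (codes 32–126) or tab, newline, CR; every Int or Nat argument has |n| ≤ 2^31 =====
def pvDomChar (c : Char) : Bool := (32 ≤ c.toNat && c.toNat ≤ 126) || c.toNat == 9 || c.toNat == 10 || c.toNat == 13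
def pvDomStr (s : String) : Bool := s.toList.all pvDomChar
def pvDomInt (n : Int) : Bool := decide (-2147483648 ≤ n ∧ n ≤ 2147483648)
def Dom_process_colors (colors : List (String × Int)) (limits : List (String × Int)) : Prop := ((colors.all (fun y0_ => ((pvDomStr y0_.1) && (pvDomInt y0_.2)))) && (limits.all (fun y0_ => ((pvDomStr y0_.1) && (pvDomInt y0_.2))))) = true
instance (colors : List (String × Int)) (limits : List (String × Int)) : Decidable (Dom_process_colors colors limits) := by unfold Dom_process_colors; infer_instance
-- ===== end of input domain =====

-- B replaces A's fused forward accumulator loop with a divide-and-conquer reduction (split, recurse, combine with && and *); objective: alternative, same practical cost.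


-- ===== PORT A =====
-- dict parameters are modelled through PySem.Dict.ofList (duplicate keys collapse, last value wins, as in Python)
def process_colors (colors : List (String × Int)) (limits : List (String × Int)) : Bool × Int :=
  let L := PySem.Dict.ofList limits
  let st := (PySem.Dict.ofList colors).items.foldl (fun (st : Int × Bool) cv =>
    let product := st.1 * cv.2
    let is_valid :=
      match L.get? cv.1 with      -- 'color in limits and value > limits[color]'
      | some l => if cv.2 > l then false else st.2
      | none => st.2
    (product, is_valid)) (1, true)
  (st.2, st.1)

-- ===== PORT B =====
-- Source B's 'ok(color, value)'
def pcOk (limits : PySem.Dict String Int) (cv : String × Int) : Bool :=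
  match limits.get? cv.1 with
  | some l => !(cv.2 > l)
  | none => true

-- Source B's recursive 'go': split the item list in half, reduce each half, combine with && and *
def pcGo (limits : PySem.Dict String Int) (xs : List (String × Int)) : Bool × Int :=
  match h : xs with
  | [] => (true, 1)
  | [cv] => (pcOk limits cv, cv.2)
  | _ :: _ :: _ =>
    let m := xs.length / 2
    let r1 := pcGo limits (xs.take m)
    let r2 := pcGo limits (xs.drop m)
    (r1.1 && r2.1, r1.2 * r2.2)
termination_by xs.length
decreasing_by
  · simp [h]; omega
  · simp [h]; omega

def process_colors_alt (colors : List (String × Int)) (limits : List (String × Int)) : Bool × Int :=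
  pcGo (PySem.Dict.ofList limits) (PySem.Dict.ofList colors).items

-- ===== PRECONDITION & SPEC =====
def Spec_process_colors (colors : List (String × Int)) (limits : List (String × Int)) (out : Bool × Int) : Prop := out = process_colors_alt colors limits
instance (colors : List (String × Int)) (limits : List (String × Int)) (out : Bool × Int) : Decidable (Spec_process_colors colors limits out) := by unfold Spec_process_colors; infer_instance

-- ===== CLAIM (what is proved, stated in full; the proofs are below) =====
def Claim_equal_process_colors : Prop := ∀ (colors : List (String × Int)) (limits : List (String × Int)), Dom_process_colors colors limits → Spec_process_colors colors limits (process_colors colors limits)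

-- ===== LEMMAS AND PROOFS =====
-- B's divide-and-conquer reduction computes all-ok and product-of-values
theorem pcGo_eq (L : PySem.Dict String Int) (xs : List (String × Int)) :
    pcGo L xs = (xs.all (pcOk L), (xs.map Prod.snd).prod) := by
  fun_induction pcGo L xs with
  | case1 => simp
  | case2 => simp
  | case3 a b t m ih1 ih2 =>
    simp only []
    rw [ih1, ih2]
    refine Prod.ext ?_ ?_
    · show ((List.take m (a::b::t)).all (pcOk L) && (List.drop m (a::b::t)).all (pcOk L)) = _
      rw [← List.all_append, List.take_append_drop]
    · show (List.map Prod.snd (List.take m (a::b::t))).prod * (List.map Prod.snd (List.drop m (a::b::t))).prod = _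
      rw [← List.prod_append, ← List.map_append, List.take_append_drop]

-- A's fused loop computes the same closed form
theorem pc_loop (L : PySem.Dict String Int) (xs : List (String × Int)) (p : Int) (b : Bool) :
    xs.foldl (fun (st : Int × Bool) cv =>
      let product := st.1 * cv.2
      let is_valid :=
        match L.get? cv.1 with
        | some l => if cv.2 > l then false else st.2
        | none => st.2
      (product, is_valid)) (p, b)
    = (p * (xs.map Prod.snd).prod, b && xs.all (pcOk L)) := by
  induction xs generalizing p b with
  | nil => simp
  | cons cv rest ih =>
    simp only [List.foldl_cons, List.all_cons, List.map_cons, List.prod_cons]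
    rw [ih]
    have hp : p * cv.2 * (rest.map Prod.snd).prod = p * (cv.2 * (rest.map Prod.snd).prod) := by ring
    unfold pcOk
    cases h : L.get? cv.1 with
    | none => simp [hp]
    | some l =>
      by_cases hv : cv.2 > l
      · simp [hv, hp]
      · simp [hv, hp, Bool.and_comm]

-- ===== VERDICT (by name: the statement is the Claim_ definition above) =====
theorem process_colors_spec : Claim_equal_process_colors := by
  intro colors limits _
  unfold Spec_process_colors process_colors process_colors_alt
  rw [pcGo_eq]
  simp only [pc_loop]
  simp
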